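-- pv_equiv track=rewrite | github.com/docking-org/pydock3 | pydock3/files.py | get_trailing_comment_block_start_index
-- ===== SOURCE A (Python) =====
-- from typing import List, Tuple, Union, Optional, Dict, Any, TextIO, Generator
--
-- def get_trailing_comment_block_start_index(lines: List[str]) -> Union[int, None]:
--     """Get the start index of the trailing comment block if it exists."""
--
--     trailing_comment_block_start_index = None
--     for i in reversed(range(len(lines))):
--         line = lines[i].strip()
--         if line.startswith("#"):
--             trailing_comment_block_start_index = i
--         elif line == "":
--             continue
--         elif line != "":
--             break
--
--     return trailing_comment_block_start_index
-- ===== SOURCE B (Python) =====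
-- from typing import List, Union
--
-- def get_trailing_comment_block_start_index(lines: List[str]) -> Union[int, None]:
--     """Get the start index of the trailing comment block if it exists."""
--
--     # pass 1: index of the last non-blank, non-comment ("code") line, -1 if none
--     last_code = -1
--     for i, line in enumerate(lines):
--         stripped = line.strip()
--         if stripped != "" and not stripped.startswith("#"):
--             last_code = i
--     # pass 2: first comment line after the last code line
--     for i in range(last_code + 1, len(lines)):
--         if lines[i].strip().startswith("#"):
--             return i
--     return None
-- ===== Notes on version B (the rewrite author's own statement) =====
-- stated objective: alternative
-- what changed: Replaces A's single backward latching scan (which carries and possibly overwrites a candidate index until a code line breaks the loop) with two forward passes: first find the index of the last non-blank non-comment line, then return the first comment-line index after it.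
import Mathlib
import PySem

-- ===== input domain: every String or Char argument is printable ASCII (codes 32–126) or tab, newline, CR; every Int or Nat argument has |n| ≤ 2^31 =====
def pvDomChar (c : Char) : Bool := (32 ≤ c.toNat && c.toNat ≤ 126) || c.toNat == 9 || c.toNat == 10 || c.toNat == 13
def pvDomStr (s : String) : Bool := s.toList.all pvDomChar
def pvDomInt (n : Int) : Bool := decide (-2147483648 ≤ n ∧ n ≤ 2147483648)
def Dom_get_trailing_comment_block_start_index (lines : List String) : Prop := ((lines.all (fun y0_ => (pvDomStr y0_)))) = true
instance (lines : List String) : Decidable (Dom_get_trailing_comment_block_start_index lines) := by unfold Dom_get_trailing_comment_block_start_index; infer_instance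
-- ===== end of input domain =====

-- B replaces A's backward latching scan with two forward passes (last-code boundary, then first comment after it); alternative decomposition, same cost.

-- ===== PORT A =====
-- the backward loop 'for i in reversed(range(len(lines)))' with its break, as structural recursion over the index list
def pvAloop (lines : List String) : List Int → Option Int → Option Int
  | [], acc => acc
  | i :: rest, acc =>
    let line := PySem.Str.strip (PySem.List.pyGetD lines i "")
    if PySem.Str.startswith line "#" then pvAloop lines rest (some i)
    else if line == "" then pvAloop lines rest acc
    else acc

def get_trailing_comment_block_start_index (lines : List String) : Option Int :=
  -- reversed(range(len(lines))) = range(len(lines)-1, -1, -1)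
  pvAloop lines (PySem.List.pyRange ((lines.length : Int) - 1) (-1) (-1)) none

-- ===== PORT B =====
-- pass 1: 'for i, line in enumerate(lines): …' folding the last code index, -1 if none
def pvLastCode (lines : List String) : Int :=
  (PySem.List.enumerate lines 0).foldl
    (fun acc p =>
      let stripped := PySem.Str.strip p.2
      if !(stripped == "") && !(PySem.Str.startswith stripped "#") then p.1 else acc)
    (-1)

-- pass 2: 'for i in range(last_code+1, len(lines)): if …: return i' as recursion over the index list
def pvScan (lines : List String) : List Int → Option Int
  | [] => none
  | i :: rest =>
    if PySem.Str.startswith (PySem.Str.strip (PySem.List.pyGetD lines i "")) "#" then some i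
    else pvScan lines rest

def get_trailing_comment_block_start_index_alt (lines : List String) : Option Int :=
  pvScan lines (PySem.List.pyRange (pvLastCode lines + 1) (lines.length : Int) 1)

-- ===== PRECONDITION & SPEC =====
def Spec_get_trailing_comment_block_start_index (lines : List String) (out : Option Int) : Prop := out = get_trailing_comment_block_start_index_alt lines
instance (lines : List String) (out : Option Int) : Decidable (Spec_get_trailing_comment_block_start_index lines out) := by unfold Spec_get_trailing_comment_block_start_index; infer_instance

-- ===== CLAIM (what is proved, stated in full; the proofs are below) =====
def Claim_equal_get_trailing_comment_block_start_index : Prop := ∀ (lines : List String), Dom_get_trailing_comment_block_start_index lines → Spec_get_trailing_comment_block_start_index lines (get_trailing_comment_block_start_index lines)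

-- ===== LEMMAS AND PROOFS =====

-- enumerate step for pvLastCode over an appended element
lemma pvLastCode_append (lines : List String) (x : String) :
    pvLastCode (lines ++ [x]) =
      (if !(PySem.Str.strip x == "") && !(PySem.Str.startswith (PySem.Str.strip x) "#")
       then (lines.length : Int) else pvLastCode lines) := by
  unfold pvLastCode
  rw [PySem.List.enumerate_append]
  simp [PySem.List.enumerate, List.foldl_append]

lemma pvLastCode_lt (lines : List String) : pvLastCode lines < (lines.length : Int) ∧ -1 ≤ pvLastCode lines := by
  induction lines using List.reverseRecOn with
  | nil => simp [pvLastCode, PySem.List.enumerate]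
  | append_singleton ls x ih =>
    rw [pvLastCode_append]
    simp only [List.length_append, List.length_singleton]
    split_ifs <;> push_cast <;> omega

-- pvAloop only reads indices in [0, lines.length): appending a line does not change it
lemma pvAloop_append (lines : List String) (x : String) (idxs : List Int) (acc : Option Int)
    (h : ∀ i ∈ idxs, 0 ≤ i ∧ i < (lines.length : Int)) :
    pvAloop (lines ++ [x]) idxs acc = pvAloop lines idxs acc := by
  induction idxs generalizing acc with
  | nil => rfl
  | cons i rest ih =>
    obtain ⟨h0, h1⟩ := h i (List.mem_cons_self ..)
    have hget : PySem.List.pyGetD (lines ++ [x]) i "" = PySem.List.pyGetD lines i "" := by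
      rw [PySem.List.pyGetD_eq_getElem _ _ h0 (by simp; omega),
          PySem.List.pyGetD_eq_getElem _ _ h0 h1]
      exact List.getElem_append_left (by omega)
    have hrest : ∀ j ∈ rest, 0 ≤ j ∧ j < (lines.length : Int) :=
      fun j hj => h j (List.mem_cons_of_mem _ hj)
    simp only [pvAloop, hget]
    split_ifs <;> first | rfl | exact ih _ hrest

lemma pvScan_congr_append (lines : List String) (x : String) (idxs : List Int)
    (h : ∀ i ∈ idxs, 0 ≤ i ∧ i < (lines.length : Int)) :
    pvScan (lines ++ [x]) idxs = pvScan lines idxs := by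
  induction idxs with
  | nil => rfl
  | cons i rest ih =>
    obtain ⟨h0, h1⟩ := h i (List.mem_cons_self ..)
    have hget : PySem.List.pyGetD (lines ++ [x]) i "" = PySem.List.pyGetD lines i "" := by
      rw [PySem.List.pyGetD_eq_getElem _ _ h0 (by simp; omega),
          PySem.List.pyGetD_eq_getElem _ _ h0 h1]
      exact List.getElem_append_left (by omega)
    have hrest : ∀ j ∈ rest, 0 ≤ j ∧ j < (lines.length : Int) :=
      fun j hj => h j (List.mem_cons_of_mem _ hj)
    simp only [pvScan, hget]
    split_ifs <;> first | rfl | exact ih hrest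

lemma pvScan_append (lines : List String) (xs ys : List Int) :
    pvScan lines (xs ++ ys) =
      (match pvScan lines xs with
       | some v => some v
       | none => pvScan lines ys) := by
  induction xs with
  | nil => rfl
  | cons i rest ih =>
    simp only [List.cons_append, pvScan]
    split_ifs <;> simp [ih]

lemma pv_main (lines : List String) (init : Option Int) :
    pvAloop lines (PySem.List.pyRange ((lines.length : Int) - 1) (-1) (-1)) init =
      (match pvScan lines (PySem.List.pyRange (pvLastCode lines + 1) (lines.length : Int) 1) with
       | some v => some v
       | none => init) := by
  induction lines using List.reverseRecOn generalizing init with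
  | nil =>
    have h1 : PySem.List.pyRange ((([] : List String).length : Int) - 1) (-1) (-1) = [] := by
      apply PySem.List.pyRange_neg_one_eq_nil; simp
    have h2 : pvLastCode ([] : List String) = -1 := by simp [pvLastCode, PySem.List.enumerate]
    rw [h1, h2]
    simp [pvAloop, pvScan]
  | append_singleton ls x ih =>
    have hn : (((ls ++ [x]).length : Int) - 1) = (ls.length : Int) := by simp
    have hcons : PySem.List.pyRange ((((ls ++ [x]).length : Int)) - 1) (-1) (-1)
        = (ls.length : Int) :: PySem.List.pyRange ((ls.length : Int) - 1) (-1) (-1) := by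
      rw [hn, PySem.List.pyRange_neg_one_cons (by omega)]
    have hgetx : PySem.List.pyGetD (ls ++ [x]) (ls.length : Int) "" = x := by
      rw [PySem.List.pyGetD_eq_getElem _ _ (by omega) (by simp)]
      simp
    have hmemrev : ∀ i ∈ PySem.List.pyRange ((ls.length : Int) - 1) (-1) (-1),
        0 ≤ i ∧ i < (ls.length : Int) := by
      intro i hi
      rw [PySem.List.mem_pyRange_neg_one] at hi
      omega
    obtain ⟨hclt, hcge⟩ := pvLastCode_lt ls
    have hmemfwd : ∀ i ∈ PySem.List.pyRange (pvLastCode ls + 1) ((ls.length : Int)) 1,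
        0 ≤ i ∧ i < (ls.length : Int) := by
      intro i hi
      rw [PySem.List.mem_pyRange_one] at hi
      omega
    have hsplit : PySem.List.pyRange (pvLastCode ls + 1) (((ls ++ [x]).length : Int)) 1
        = PySem.List.pyRange (pvLastCode ls + 1) ((ls.length : Int)) 1
          ++ PySem.List.pyRange ((ls.length : Int)) (((ls ++ [x]).length : Int)) 1 := by
      exact PySem.List.pyRange_one_append _ _ _ (by omega) (by simp)
    have hone : PySem.List.pyRange ((ls.length : Int)) (((ls ++ [x]).length : Int)) 1
        = [(ls.length : Int)] := by
      have hlen : (((ls ++ [x]).length : Int)) = (ls.length : Int) + 1 := by simp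
      rw [hlen]
      exact PySem.List.pyRange_one_singleton _
    rw [hcons]
    show (if PySem.Str.startswith (PySem.Str.strip (PySem.List.pyGetD (ls ++ [x]) (ls.length : Int) "")) "#"
            then pvAloop (ls ++ [x]) (PySem.List.pyRange ((ls.length : Int) - 1) (-1) (-1)) (some (ls.length : Int))
            else if PySem.Str.strip (PySem.List.pyGetD (ls ++ [x]) (ls.length : Int) "") == ""
              then pvAloop (ls ++ [x]) (PySem.List.pyRange ((ls.length : Int) - 1) (-1) (-1)) init
              else init) = _
    rw [hgetx, pvLastCode_append]
    by_cases hS : PySem.Str.startswith (PySem.Str.strip x) "#" = true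
    · -- comment line: A latches index ls.length and continues leftwards; B's tail scan finds ls.length last
      have hcode : (!(PySem.Str.strip x == "") && !(PySem.Str.startswith (PySem.Str.strip x) "#")) = false := by
        rw [hS]
        simp
      rw [if_pos hS]
      show pvAloop (ls ++ [x]) (PySem.List.pyRange ((ls.length : Int) - 1) (-1) (-1)) (some (ls.length : Int)) = _
      rw [pvAloop_append ls x _ _ hmemrev, ih]
      conv_rhs => rw [hcode]
      rw [if_neg (by simp), hsplit, pvScan_append, pvScan_congr_append ls x _ hmemfwd, hone]
      show _ = (match (match pvScan ls _ with
                       | some v => some v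
                       | none => (if PySem.Str.startswith (PySem.Str.strip (PySem.List.pyGetD (ls ++ [x]) (ls.length : Int) "")) "#"
                                    then some (ls.length : Int) else pvScan (ls ++ [x]) [])) with
                | some v => some v
                | none => init)
      rw [hgetx, if_pos hS]
      cases pvScan ls (PySem.List.pyRange (pvLastCode ls + 1) ((ls.length : Int)) 1) <;> rfl
    · rw [if_neg hS]
      rw [Bool.not_eq_true] at hS
      by_cases hE : (PySem.Str.strip x == "") = true
      · -- blank line: skipped by both passes
        have hcode : (!(PySem.Str.strip x == "") && !(PySem.Str.startswith (PySem.Str.strip x) "#")) = false := by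
          rw [hE]
          simp
        rw [if_pos hE]
        rw [pvAloop_append ls x _ _ hmemrev, ih]
        conv_rhs => rw [hcode]
        rw [if_neg (by simp), hsplit, pvScan_append, pvScan_congr_append ls x _ hmemfwd, hone]
        show _ = (match (match pvScan ls _ with
                         | some v => some v
                         | none => (if PySem.Str.startswith (PySem.Str.strip (PySem.List.pyGetD (ls ++ [x]) (ls.length : Int) "")) "#"
                                      then some (ls.length : Int) else pvScan (ls ++ [x]) [])) with
                  | some v => some v
                  | none => init)
        rw [hgetx, hS, if_neg (by simp)]
        cases pvScan ls (PySem.List.pyRange (pvLastCode ls + 1) ((ls.length : Int)) 1) <;> rfl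
      · -- code line: A breaks with acc = init; B's tail scan range is empty
        rw [if_neg hE]
        rw [Bool.not_eq_true] at hE
        have hcode : (!(PySem.Str.strip x == "") && !(PySem.Str.startswith (PySem.Str.strip x) "#")) = true := by
          rw [hE, hS]
          rfl
        conv_rhs => rw [hcode]
        rw [if_pos rfl]
        have hempty : PySem.List.pyRange ((ls.length : Int) + 1) (((ls ++ [x]).length : Int)) 1 = [] := by
          apply PySem.List.pyRange_one_eq_nil
          simp
        rw [hempty]
        rfl

-- ===== VERDICT (by name: the statement is the Claim_ definition above) =====
theorem get_trailing_comment_block_start_index_spec : Claim_equal_get_trailing_comment_block_start_index := by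
  intro lines _
  unfold Spec_get_trailing_comment_block_start_index get_trailing_comment_block_start_index get_trailing_comment_block_start_index_alt
  rw [pv_main]
  cases pvScan lines (PySem.List.pyRange (pvLastCode lines + 1) (lines.length : Int) 1) <;> rfl
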